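-- pv_equiv track=rewrite | github.com/FantZero/ML-CodeResource | Deep-Learning/NER/prepare.py | engWordOfSentence
-- ===== SOURCE A (Python) =====
-- import string
--
-- def engWordOfSentence(sentence):
--     letters = string.ascii_letters
--     L = []
--     length = len(sentence)
--     engWord = ''
--     i = 0
--     while i < length:
--         if sentence[i] in letters:
--             engWord += sentence[i]
--             if (i+1<length and sentence[i+1] not in letters) or i+1==length:
--                 L.append(engWord.capitalize())
--                 engWord = ''
--         else:
--             L.append(sentence[i])
--         i += 1
--     return L
-- ===== SOURCE B (Python) =====
-- import string
-- from itertools import groupby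
--
-- def engWordOfSentence(sentence):
--     letters = set(string.ascii_letters)
--     L = []
--     for is_letter, run in groupby(sentence, key=lambda c: c in letters):
--         if is_letter:
--             L.append(''.join(run).capitalize())
--         else:
--             L.extend(run)
--     return L
-- ===== Notes on version B (the rewrite author's own statement) =====
-- stated objective: faster
-- what changed: Replaces the index loop with lookahead and a manual engWord buffer built by repeated string concatenation with a single itertools.groupby pass over maximal letter/non-letter runs, capitalizing letter runs and extending with non-letter chars.
import Mathlib
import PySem

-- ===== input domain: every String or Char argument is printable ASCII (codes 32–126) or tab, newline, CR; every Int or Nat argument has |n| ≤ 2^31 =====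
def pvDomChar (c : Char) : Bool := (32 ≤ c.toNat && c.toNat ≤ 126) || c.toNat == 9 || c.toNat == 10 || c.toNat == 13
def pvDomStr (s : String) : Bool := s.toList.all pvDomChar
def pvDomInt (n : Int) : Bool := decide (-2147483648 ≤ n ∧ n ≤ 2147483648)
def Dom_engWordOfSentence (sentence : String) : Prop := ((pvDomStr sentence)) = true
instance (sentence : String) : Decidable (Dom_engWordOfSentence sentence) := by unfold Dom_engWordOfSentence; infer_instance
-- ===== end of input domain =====

-- B replaces A's index loop with lookahead and a manual word buffer by one grouping
-- pass over maximal letter/non-letter runs (itertools.groupby), avoiding A's repeated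
-- string concatenation when building each word.

-- membership in string.ascii_letters (shared by both Pythons)
def isLetter (c : Char) : Bool := ('a' ≤ c && c ≤ 'z') || ('A' ≤ c && c ≤ 'Z')

-- str.capitalize() on ASCII: first char uppercased, rest lowercased (shared by both Pythons)
def pyCap : List Char → List Char
  | [] => []
  | c :: r => PySem.Chars.upperChar c :: r.map PySem.Chars.lowerChar

-- ===== PORT A =====
-- the while loop over i with lookahead at i+1, carrying the engWord buffer
def engLoop : List Char → List Char → List String
  | [], _ => []
  | c :: rest, ew =>
    if isLetter c then
      let ew2 := ew ++ [c]
      match rest with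
      | [] => [String.mk (pyCap ew2)]
      | d :: _ =>
        if isLetter d then engLoop rest ew2
        else String.mk (pyCap ew2) :: engLoop rest []
    else String.mk [c] :: engLoop rest ew

def engWordOfSentence (sentence : String) : List String :=
  engLoop sentence.toList []

-- ===== PORT B =====
-- itertools.groupby(sentence, key = c in letters): maximal runs of chars with equal isLetter
def runs : List Char → List (List Char)
  | [] => []
  | c :: cs =>
    match runs cs with
    | [] => [[c]]
    | r :: rs => if isLetter c == isLetter (r.headD 'a') then (c :: r) :: rs else [c] :: r :: rs

-- the for loop over the groups: append the capitalized word, or extend with the chars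
def engWordOfSentence_alt (sentence : String) : List String :=
  (runs sentence.toList).flatMap (fun r =>
    if isLetter (r.headD 'a') then [String.mk (pyCap r)]
    else r.map (fun ch => String.mk [ch]))

-- ===== PRECONDITION & SPEC =====
def Spec_engWordOfSentence (sentence : String) (out : List String) : Prop := out = engWordOfSentence_alt sentence
instance (sentence : String) (out : List String) : Decidable (Spec_engWordOfSentence sentence out) := by unfold Spec_engWordOfSentence; infer_instance

-- ===== CLAIM (what is proved, stated in full; the proofs are below) =====
def Claim_equal_engWordOfSentence : Prop := ∀ (sentence : String), Dom_engWordOfSentence sentence → Spec_engWordOfSentence sentence (engWordOfSentence sentence)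

-- ===== LEMMAS AND PROOFS =====

-- common reference shape: a word run is head + longest letter prefix of the tail
def engRef : List Char → List String
  | [] => []
  | c :: cs =>
    if isLetter c then
      String.mk (pyCap (c :: cs.takeWhile isLetter)) :: engRef (cs.dropWhile isLetter)
    else String.mk [c] :: engRef cs
  termination_by l => l.length
  decreasing_by
    · exact Nat.lt_succ_of_le (List.length_dropWhile_le _ _)
    · simp

-- A's loop on a nonempty all-letter prefix followed by a non-letter (or end)
theorem engLoop_run (pre : List Char) : ∀ (cs ew : List Char),
    pre ≠ [] → (∀ c ∈ pre, isLetter c = true) →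
    (cs = [] ∨ ∃ d cs', cs = d :: cs' ∧ isLetter d = false) →
    engLoop (pre ++ cs) ew = String.mk (pyCap (ew ++ pre)) :: engLoop cs [] := by
  induction pre with
  | nil => intro _ _ h; exact absurd rfl h
  | cons c pre ih =>
    intro cs ew _ hall hcs
    have hc : isLetter c = true := hall c (by simp)
    cases pre with
    | nil =>
      rcases hcs with rfl | ⟨d, cs', rfl, hd⟩
      · simp [engLoop, hc]
      · simp [engLoop, hc, hd]
    | cons c2 pre' =>
      have hc2 : isLetter c2 = true := hall c2 (by simp)
      have := ih cs (ew ++ [c]) (by simp) (fun x hx => hall x (by simp [hx])) hcs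
      simp only [List.cons_append, engLoop, hc, hc2, if_pos, List.cons_append] at this ⊢
      rw [this]; simp

theorem engLoop_eq_engRef : ∀ (l : List Char), engLoop l [] = engRef l := by
  intro l
  induction l using engRef.induct with
  | case1 => simp [engLoop, engRef]
  | case2 c cs hc ih =>
    rw [engRef]; rw [if_pos hc]
    have hdec : c :: cs = (c :: cs.takeWhile isLetter) ++ cs.dropWhile isLetter := by
      simp [List.takeWhile_append_dropWhile]
    have hcs : cs.dropWhile isLetter = [] ∨
        ∃ d cs', cs.dropWhile isLetter = d :: cs' ∧ isLetter d = false := by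
      cases h : cs.dropWhile isLetter with
      | nil => exact Or.inl rfl
      | cons d cs' =>
        refine Or.inr ⟨d, cs', rfl, ?_⟩
        have := List.head_dropWhile_not isLetter (l := cs) (by simp [h])
        simpa [h] using this
    have hall : ∀ x ∈ c :: cs.takeWhile isLetter, isLetter x = true := by
      intro x hx
      simp only [List.mem_cons] at hx
      rcases hx with rfl | hx
      · exact hc
      · exact List.mem_takeWhile_imp hx
    rw [hdec, engLoop_run _ _ [] (by simp) hall hcs]
    rw [ih]; rfl
  | case3 c cs hc ih =>
    rw [engRef]; rw [if_neg hc]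
    rw [Bool.not_eq_true] at hc
    simp [engLoop, hc, ih]

-- B's runs of a cons: head + matching-class prefix of the tail
theorem runs_cons : ∀ (cs : List Char) (c : Char),
    runs (c :: cs) = (c :: cs.takeWhile (fun d => isLetter d == isLetter c))
      :: runs (cs.dropWhile (fun d => isLetter d == isLetter c)) := by
  intro cs
  induction cs with
  | nil => intro c; simp [runs]
  | cons d cs' ih =>
    intro c
    rw [show runs (c :: d :: cs') =
        match runs (d :: cs') with
        | [] => [[c]]
        | r :: rs => if isLetter c == isLetter (r.headD 'a') then (c :: r) :: rs
                     else [c] :: r :: rs from rfl]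
    rw [ih d]
    by_cases h : isLetter d = isLetter c
    · have hfun : (fun e => isLetter e == isLetter d) = (fun e => isLetter e == isLetter c) := by
        funext e; rw [h]
      simp [h, hfun, List.takeWhile, List.dropWhile]
    · have h' : (isLetter c == isLetter d) = false := beq_eq_false_iff_ne.mpr (fun e => h e.symm)
      have h'' : (isLetter d == isLetter c) = false := beq_eq_false_iff_ne.mpr h
      simp [List.takeWhile, List.dropWhile, h', h'']
      exact (ih d).symm

def flatRuns (rs : List (List Char)) : List String :=
  rs.flatMap (fun r =>
    if isLetter (r.headD 'a') then [String.mk (pyCap r)]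
    else r.map (fun ch => String.mk [ch]))

theorem flatRuns_cons (r : List Char) (rs : List (List Char)) :
    flatRuns (r :: rs) = (if isLetter (r.headD 'a') then [String.mk (pyCap r)]
      else r.map (fun ch => String.mk [ch])) ++ flatRuns rs := rfl

theorem flatRuns_eq_engRef : ∀ (l : List Char), flatRuns (runs l) = engRef l := by
  intro l
  induction l using engRef.induct with
  | case1 => simp [runs, flatRuns, engRef]
  | case2 c cs hc ih =>
    have hfun : (fun d => isLetter d == isLetter c) = isLetter := by
      funext d; rw [hc]; cases isLetter d <;> rfl
    rw [runs_cons cs c, hfun, flatRuns_cons, engRef, if_pos hc]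
    simp only [List.headD_cons, hc, if_pos]
    rw [ih]; rfl
  | case3 c cs hc ih =>
    rw [Bool.not_eq_true] at hc
    have hfun : (fun d => isLetter d == isLetter c) = (fun d => !isLetter d) := by
      funext d; rw [hc]; cases isLetter d <;> rfl
    rw [runs_cons cs c, hfun, flatRuns_cons, engRef, if_neg (by simp [hc])]
    simp only [List.headD_cons, hc, Bool.false_eq_true, if_neg, List.map_cons, List.cons_append]
    congr 1
    rw [← ih]
    cases cs with
    | nil => simp [List.takeWhile_nil, List.dropWhile_nil]
    | cons d cs' =>
      by_cases hd : isLetter d = true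
      · simp [List.takeWhile_cons, List.dropWhile_cons, hd]
      · rw [Bool.not_eq_true] at hd
        have hfun2 : (fun e => isLetter e == isLetter d) = (fun e => !isLetter e) := by
          funext e; rw [hd]; cases isLetter e <;> rfl
        rw [runs_cons cs' d, hfun2, flatRuns_cons]
        simp [List.takeWhile_cons, List.dropWhile_cons, hd]

-- ===== VERDICT (by name: the statement is the Claim_ definition above) =====
theorem engWordOfSentence_spec : Claim_equal_engWordOfSentence := by
  intro s _
  show engWordOfSentence s = engWordOfSentence_alt s
  have h1 : engWordOfSentence s = engRef s.toList := engLoop_eq_engRef s.toList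
  have h2 : engWordOfSentence_alt s = flatRuns (runs s.toList) := rfl
  rw [h1, h2, flatRuns_eq_engRef]
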